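-- pv_equiv track=rewrite | github.com/ABrasburg/TDA-respuestas | Division_y_conquista/Ej14.py | contar_votos
-- ===== SOURCE A (Python) =====
-- def contar_votos(votos, opciones): # O(o log n) y como o<<n => O(log n)
--     conteo = {}
--     inicio = 0
--
--     for opcion in opciones:
--         fin = buscar_fin(opcion, votos, inicio)
--         cantidad_votos = fin - inicio
--         if cantidad_votos > 0:
--             conteo[opcion] = cantidad_votos
--         inicio = fin
--
--     return conteo
--
-- def buscar_fin(opcion, votos, inicio): # O(log n)
--     # Realizamos una búsqueda binaria para encontrar el final de la opción en los votos
--     izquierda = inicio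
--     derecha = len(votos) - 1
--     while izquierda <= derecha:
--         medio = (izquierda + derecha) // 2
--         if votos[medio] == opcion:
--             izquierda = medio + 1
--         elif votos[medio] < opcion:
--             izquierda = medio + 1
--         else:
--             derecha = medio - 1
--     return izquierda
-- ===== SOURCE B (Python) =====
-- def contar_votos(votos, opciones):
--     # Single forward-only pointer instead of a binary search per option: O(n + o).
--     conteo = {}
--     n = len(votos)
--     p = 0
--     for opcion in opciones:
--         inicio = p
--         while p < n and votos[p] <= opcion:
--             p += 1
--         if p > inicio:
--             conteo[opcion] = p - inicio
--     return conteo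
-- ===== Notes on version B (the rewrite author's own statement) =====
-- stated objective: faster
-- what changed: Replaced the per-option binary search (buscar_fin, O(log n) per option) with a single forward-only two-pointer linear scan over votos shared by all options, O(n+o) total; equivalence is claimed on inputs where votos is partitioned w.r.t. each option (in particular any sorted votes array).
-- outside the precondition, e.g. on contar_votos([2, 0, 1], [1]): A returns {1: 3}, B returns {}
import Mathlib
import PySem

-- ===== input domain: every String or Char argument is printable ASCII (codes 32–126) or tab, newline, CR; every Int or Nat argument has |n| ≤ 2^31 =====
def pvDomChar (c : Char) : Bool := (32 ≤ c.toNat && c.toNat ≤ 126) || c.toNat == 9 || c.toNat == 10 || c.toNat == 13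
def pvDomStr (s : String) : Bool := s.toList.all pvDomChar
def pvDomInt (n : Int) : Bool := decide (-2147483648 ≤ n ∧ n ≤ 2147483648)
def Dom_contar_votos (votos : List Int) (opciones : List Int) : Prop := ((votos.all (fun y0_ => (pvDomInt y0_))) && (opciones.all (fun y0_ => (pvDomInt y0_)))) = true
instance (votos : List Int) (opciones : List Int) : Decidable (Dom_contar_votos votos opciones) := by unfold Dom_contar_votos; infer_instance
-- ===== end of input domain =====

-- B replaces A's per-option binary search by one forward-only two-pointer linear scan
-- (idiomatic single pass); equivalence is claimed on sorted votos (the function's stated domain).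

-- ===== PORT A =====
-- the while-loop of buscar_fin; indices are always in [0, len) when the loop body runs,
-- so votos[medio] is read with pyGetD (default never used, Python never raises here)
def buscarFinGo (opcion : Int) (votos : List Int) (izquierda derecha : Int) : Int :=
  if _h : izquierda ≤ derecha then
    let medio := PySem.Int.floordiv (izquierda + derecha) 2
    let v := PySem.List.pyGetD votos medio 0
    if v = opcion then buscarFinGo opcion votos (medio + 1) derecha
    else if v < opcion then buscarFinGo opcion votos (medio + 1) derecha
    else buscarFinGo opcion votos izquierda (medio - 1)
  else izquierda
termination_by (derecha - izquierda + 1).toNat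
decreasing_by
  all_goals
    have := (PySem.Int.floordiv_two_mid_bounds (lo := izquierda) (hi := derecha) _h)
    omega

def buscar_fin (opcion : Int) (votos : List Int) (inicio : Int) : Int :=
  buscarFinGo opcion votos inicio (PySem.List.len votos - 1)

def contarGoA (votos : List Int) (opciones : List Int)
    (conteo : PySem.Dict Int Int) (inicio : Int) : PySem.Dict Int Int :=
  match opciones with
  | [] => conteo
  | opcion :: rest =>
      let fin := buscar_fin opcion votos inicio
      let cantidad_votos := fin - inicio
      contarGoA votos rest
        (if cantidad_votos > 0 then conteo.insert opcion cantidad_votos else conteo) fin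

def contar_votos (votos : List Int) (opciones : List Int) : List (Int × Int) :=
  (contarGoA votos opciones PySem.Dict.empty 0).items

-- ===== PORT B =====
-- the while-loop: advance p while p < n and votos[p] <= opcion
def avanzar (opcion : Int) (votos : List Int) (p : Int) : Int :=
  if _h : p < PySem.List.len votos ∧ PySem.List.pyGetD votos p 0 ≤ opcion then
    avanzar opcion votos (p + 1)
  else p
termination_by (PySem.List.len votos - p).toNat
decreasing_by omega

def contarGoB (votos : List Int) (opciones : List Int)
    (conteo : PySem.Dict Int Int) (p : Int) : PySem.Dict Int Int :=
  match opciones with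
  | [] => conteo
  | opcion :: rest =>
      let inicio := p
      let p' := avanzar opcion votos p
      contarGoB votos rest
        (if p' > inicio then conteo.insert opcion (p' - inicio) else conteo) p'

def contar_votos_alt (votos : List Int) (opciones : List Int) : List (Int × Int) :=
  (contarGoB votos opciones PySem.Dict.empty 0).items

-- ===== PRECONDITION & SPEC =====
-- Pre_ requires votos to be partitioned w.r.t. each option (every vote ≤ opcion precedes
-- every vote > opcion) — true of any sorted votes array, the function's stated domain;
-- on other inputs A's binary search returns an accidental index (e.g. A([2,0,1],[1]) = {1: 3})
-- while B's linear scan counts what is actually ≤ opcion.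
def Pre_contar_votos (votos : List Int) (opciones : List Int) : Prop :=
  ∀ x ∈ opciones, votos.Pairwise (fun a b => b ≤ x → a ≤ x)
instance (votos : List Int) (opciones : List Int) : Decidable (Pre_contar_votos votos opciones) := by
  unfold Pre_contar_votos; infer_instance

def pvWitness_contar_votos : List Int × List Int := ([1, 1, 2, 4, 4, 4], [1, 2, 3, 4])

def Spec_contar_votos (votos : List Int) (opciones : List Int) (out : List (Int × Int)) : Prop := out = contar_votos_alt votos opciones
instance (votos : List Int) (opciones : List Int) (out : List (Int × Int)) : Decidable (Spec_contar_votos votos opciones out) := by unfold Spec_contar_votos; infer_instance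

-- ===== CLAIM (what is proved, stated in full; the proofs are below) =====
def Claim_equal_contar_votos : Prop := ∀ (votos : List Int) (opciones : List Int), Dom_contar_votos votos opciones → Pre_contar_votos votos opciones → Spec_contar_votos votos opciones (contar_votos votos opciones)

-- ===== LEMMAS AND PROOFS =====

-- the predicate 'vote ≤ x' is prefix-closed on a partitioned list
theorem pv_part_le (votos : List Int) {x : Int}
    (hs : votos.Pairwise (fun a b => b ≤ x → a ≤ x))
    {a b : Int} (ha : 0 ≤ a) (hab : a ≤ b) (hb : b < (votos.length : Int))
    (hbx : PySem.List.pyGetD votos b 0 ≤ x) : PySem.List.pyGetD votos a 0 ≤ x := by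
  rw [PySem.List.pyGetD_eq_getElem votos 0 (by omega) hb] at hbx
  rw [PySem.List.pyGetD_eq_getElem votos 0 ha (by omega)]
  rcases eq_or_lt_of_le hab with h | h
  · subst h; exact hbx
  · exact (List.pairwise_iff_getElem.mp hs) a.toNat b.toNat (by omega) (by omega) (by omega) hbx

-- contrapositive form: 'vote > x' is suffix-closed
theorem pv_part_gt (votos : List Int) {x : Int}
    (hs : votos.Pairwise (fun a b => b ≤ x → a ≤ x))
    {a b : Int} (ha : 0 ≤ a) (hab : a ≤ b) (hb : b < (votos.length : Int))
    (hax : x < PySem.List.pyGetD votos a 0) : x < PySem.List.pyGetD votos b 0 := by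
  by_contra h
  exact absurd (pv_part_le votos hs ha hab hb (not_lt.mp h)) (not_le.mpr hax)

-- characterization: r is the first index ≥ inicio whose element exceeds opcion (or len)
def IsEnd (opcion : Int) (votos : List Int) (inicio r : Int) : Prop :=
  inicio ≤ r ∧ r ≤ (votos.length : Int) ∧
  (∀ k, inicio ≤ k → k < r → PySem.List.pyGetD votos k 0 ≤ opcion) ∧
  (∀ k, r ≤ k → k < (votos.length : Int) → opcion < PySem.List.pyGetD votos k 0)

theorem pv_isEnd_unique {opcion : Int} {votos : List Int} {inicio r1 r2 : Int}
    (h1 : IsEnd opcion votos inicio r1) (h2 : IsEnd opcion votos inicio r2) : r1 = r2 := by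
  obtain ⟨a1, b1, c1, d1⟩ := h1
  obtain ⟨a2, b2, c2, d2⟩ := h2
  by_contra hne
  rcases lt_or_gt_of_ne hne with h | h
  · exact absurd (c2 r1 a1 h) (not_le.mpr (d1 r1 (le_refl _) (by omega)))
  · exact absurd (c1 r2 a2 h) (not_le.mpr (d2 r2 (le_refl _) (by omega)))

theorem pv_bs_isEnd (opcion : Int) (votos : List Int) (hs : votos.Pairwise (fun a b => b ≤ opcion → a ≤ opcion))
    (inicio : Int) (h0 : 0 ≤ inicio) :
    ∀ izq der : Int, inicio ≤ izq → izq ≤ (votos.length : Int) →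
    der ≤ (votos.length : Int) - 1 → izq ≤ der + 1 →
    (∀ k, inicio ≤ k → k < izq → PySem.List.pyGetD votos k 0 ≤ opcion) →
    (∀ k, der < k → k < (votos.length : Int) → opcion < PySem.List.pyGetD votos k 0) →
    IsEnd opcion votos inicio (buscarFinGo opcion votos izq der) := by
  intro izq der
  induction izq, der using buscarFinGo.induct opcion votos with
  | case1 izq der hle medio v hv ih =>
    intro h1 h2 h3 h4 H1 H2
    have hm := PySem.Int.floordiv_two_mid_bounds (lo := izq) (hi := der) hle
    have hm2 : izq ≤ medio ∧ medio ≤ der := hm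
    have hv' : PySem.List.pyGetD votos (PySem.Int.floordiv (izq + der) 2) 0 = opcion := hv
    rw [buscarFinGo]
    simp only [dif_pos hle]
    rw [if_pos hv']
    exact ih (by omega) (by omega) h3 (by omega)
      (fun k hk1 hk2 => by
        by_cases hk : k < izq
        · exact H1 k hk1 hk
        · exact pv_part_le votos hs (by omega) (show k ≤ medio by omega) (by omega)
            (le_of_eq hv')) H2
  | case2 izq der hle medio v hv1 hv2 ih =>
    intro h1 h2 h3 h4 H1 H2
    have hm := PySem.Int.floordiv_two_mid_bounds (lo := izq) (hi := der) hle
    have hm2 : izq ≤ medio ∧ medio ≤ der := hm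
    have hv1' : ¬ PySem.List.pyGetD votos (PySem.Int.floordiv (izq + der) 2) 0 = opcion := hv1
    have hv2' : PySem.List.pyGetD votos (PySem.Int.floordiv (izq + der) 2) 0 < opcion := hv2
    rw [buscarFinGo]
    simp only [dif_pos hle]
    rw [if_neg hv1', if_pos hv2']
    exact ih (by omega) (by omega) h3 (by omega)
      (fun k hk1 hk2 => by
        by_cases hk : k < izq
        · exact H1 k hk1 hk
        · exact pv_part_le votos hs (by omega) (show k ≤ medio by omega) (by omega)
            (le_of_lt hv2')) H2
  | case3 izq der hle medio v hv1 hv2 ih =>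
    intro h1 h2 h3 h4 H1 H2
    have hm := PySem.Int.floordiv_two_mid_bounds (lo := izq) (hi := der) hle
    have hm2 : izq ≤ medio ∧ medio ≤ der := hm
    have hv1' : ¬ PySem.List.pyGetD votos (PySem.Int.floordiv (izq + der) 2) 0 = opcion := hv1
    have hv2' : ¬ PySem.List.pyGetD votos (PySem.Int.floordiv (izq + der) 2) 0 < opcion := hv2
    have hvm : opcion < PySem.List.pyGetD votos medio 0 := by
      rcases lt_or_eq_of_le (not_lt.mp hv2') with h | h
      · exact h
      · exact absurd h.symm hv1'
    have hvm2 : opcion < PySem.List.pyGetD votos (PySem.Int.floordiv (izq + der) 2) 0 := hvm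
    rw [buscarFinGo]
    simp only [dif_pos hle]
    rw [if_neg hv1', if_neg hv2']
    exact ih h1 h2 (by omega) (by omega) H1
      (fun k hk1 hk2 =>
        pv_part_gt votos hs (show (0:Int) ≤ medio by omega) (show medio ≤ k by omega) hk2 hvm)
  | case4 izq der hle =>
    intro h1 h2 h3 h4 H1 H2
    rw [buscarFinGo]
    simp only [dif_neg hle]
    exact ⟨h1, h2, H1, fun k hk1 hk2 => H2 k (by omega) hk2⟩

theorem pv_adv_isEnd (opcion : Int) (votos : List Int)
    (hs : votos.Pairwise (fun a b => b ≤ opcion → a ≤ opcion))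
    (inicio : Int) (h0 : 0 ≤ inicio) (hlen : inicio ≤ (votos.length : Int)) :
    IsEnd opcion votos inicio (avanzar opcion votos inicio) := by
  suffices H : ∀ p : Int, 0 ≤ p → inicio ≤ p → p ≤ (votos.length : Int) →
      (∀ k, inicio ≤ k → k < p → PySem.List.pyGetD votos k 0 ≤ opcion) →
      IsEnd opcion votos inicio (avanzar opcion votos p) by
    exact H inicio h0 (le_refl _) hlen (fun k hk1 hk2 => absurd hk1 (by omega))
  intro p
  induction p using avanzar.induct opcion votos with
  | case1 p hcond ih =>
    intro hp0 h1 h2 H1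
    have hcond' := hcond
    simp only [PySem.List.len_eq] at hcond'
    rw [avanzar, dif_pos hcond]
    exact ih (by omega) (by omega) (by omega)
      (fun k hk1 hk2 => by
        by_cases hk : k < p
        · exact H1 k hk1 hk
        · have : k = p := by omega
          subst this; exact hcond.2)
  | case2 p hcond =>
    intro hp0 h1 h2 H1
    rw [avanzar, dif_neg hcond]
    push Not at hcond
    simp only [PySem.List.len_eq] at hcond
    refine ⟨h1, h2, H1, fun k hk1 hk2 => ?_⟩
    have hp : opcion < PySem.List.pyGetD votos p 0 := hcond (by omega)
    exact pv_part_gt votos hs hp0 hk1 hk2 hp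

theorem pv_fin_eq (opcion : Int) (votos : List Int)
    (hs : votos.Pairwise (fun a b => b ≤ opcion → a ≤ opcion))
    (inicio : Int) (h0 : 0 ≤ inicio) (hlen : inicio ≤ (votos.length : Int)) :
    buscar_fin opcion votos inicio = avanzar opcion votos inicio := by
  refine pv_isEnd_unique ?_ (pv_adv_isEnd opcion votos hs inicio h0 hlen)
  have := pv_bs_isEnd opcion votos hs inicio h0 inicio ((votos.length : Int) - 1) (le_refl _)
    hlen (by omega) (by omega) (fun k hk1 hk2 => absurd hk1 (by omega))
    (fun k hk1 hk2 => by omega)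
  simpa [buscar_fin, PySem.List.len_eq] using this

-- the two folds agree step by step: same dict, same pointer, on sorted votos
theorem pv_go_eq (votos : List Int) (opciones : List Int) :
    (∀ x ∈ opciones, votos.Pairwise (fun a b => b ≤ x → a ≤ x)) →
    ∀ (conteo : PySem.Dict Int Int) (p : Int), 0 ≤ p → p ≤ (votos.length : Int) →
    contarGoA votos opciones conteo p = contarGoB votos opciones conteo p := by
  induction opciones with
  | nil => intro _ conteo p _ _; rfl
  | cons opcion rest ih =>
    intro hs conteo p h0 hlen
    have hs1 := hs opcion (List.mem_cons_self ..)
    have hfin := pv_fin_eq opcion votos hs1 p h0 hlen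
    obtain ⟨e1, e2, _, _⟩ := pv_adv_isEnd opcion votos hs1 p h0 hlen
    simp only [contarGoA, contarGoB, hfin]
    by_cases hgt : avanzar opcion votos p > p
    · rw [if_pos (show avanzar opcion votos p - p > 0 by omega), if_pos hgt]
      exact ih (fun x hx => hs x (List.mem_cons_of_mem _ hx)) _ _ (by omega) e2
    · rw [if_neg (show ¬ avanzar opcion votos p - p > 0 by omega), if_neg hgt]
      exact ih (fun x hx => hs x (List.mem_cons_of_mem _ hx)) _ _ (by omega) e2

-- ===== VERDICT (by name: the statement is the Claim_ definition above) =====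
theorem contar_votos_spec : Claim_equal_contar_votos := by
  intro votos opciones _ hpre
  unfold Spec_contar_votos contar_votos contar_votos_alt
  rw [pv_go_eq votos opciones hpre PySem.Dict.empty 0 (le_refl _) (by omega)]
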